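-- pv_equiv track=rewrite | github.com/Karanjot1995/data-structures-prep | Meta/Binary Search/index.py | nearlySortedSearch
-- ===== SOURCE A (Python) =====
-- def nearlySortedSearch(arr,target):
--   start = 0
--   end = len(arr)-1
--   while start<=end:
--     mid = int((start+end)/2)
--     if target == arr[mid]:
--        return mid
--     elif mid-1>= start and target == arr[mid-1]:
--        return mid-1
--     elif mid+1<= end and target == arr[mid+1]:
--        return mid+1
--     elif target < arr[mid-1]:
--        end = mid-2
--     else:
--        start = mid+2
--     # else:
--     #    return target
--   return -1
-- ===== SOURCE B (Python) =====
-- def nearlySortedSearch(arr, target):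
--     def rec(start, end):
--         if start > end:
--             return -1
--         mid = (start + end) // 2
--         # probe the three candidate positions, first in-bounds match wins
--         for j in (mid, mid - 1, mid + 1):
--             if start <= j <= end and target == arr[j]:
--                 return j
--         if target < arr[mid - 1]:
--             return rec(start, mid - 2)
--         return rec(mid + 2, end)
--     return rec(0, len(arr) - 1)
-- ===== Notes on version B (the rewrite author's own statement) =====
-- stated objective: alternative
-- what changed: The imperative while-loop with mutable start/end is replaced by a recursive divide-and-conquer helper whose probe step is a single first-match scan over the three candidate indices (mid, mid-1, mid+1) with a uniform bounds guard, instead of A's chain of three differently-guarded elif comparisons.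
import Mathlib
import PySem

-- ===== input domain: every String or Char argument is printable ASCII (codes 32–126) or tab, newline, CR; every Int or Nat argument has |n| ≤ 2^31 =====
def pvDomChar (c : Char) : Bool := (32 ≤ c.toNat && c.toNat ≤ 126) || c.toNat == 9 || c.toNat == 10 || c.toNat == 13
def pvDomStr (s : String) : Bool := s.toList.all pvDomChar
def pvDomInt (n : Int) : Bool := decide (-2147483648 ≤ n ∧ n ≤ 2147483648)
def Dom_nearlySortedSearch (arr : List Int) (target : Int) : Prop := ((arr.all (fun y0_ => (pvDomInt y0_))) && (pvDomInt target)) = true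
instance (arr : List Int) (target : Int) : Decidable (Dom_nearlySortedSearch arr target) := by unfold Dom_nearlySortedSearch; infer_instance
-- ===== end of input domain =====

-- B rewrites A's while-loop as a recursive divide-and-conquer whose probe is a first-match
-- scan over the three candidate indices; same return value everywhere (alternative, not faster).

-- ===== PORT A =====
-- A's while loop as structural recursion on the shrinking interval [start, e].
-- int((start+end)/2): on every reachable state start+e ≥ 0, where trunc-toward-zero = floor,
-- so PySem.Int.floordiv is exact here.  arr[mid] / arr[mid-1] are always in Python range on
-- reachable states (incl. the arr[-1] wrap when mid = 0), so the getD default is never used.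
def nearlySortedSearchGo (arr : List Int) (target start e : Int) : Int :=
  if _h : start ≤ e then
    let mid := PySem.Int.floordiv (start + e) 2
    if target = PySem.List.pyGetD arr mid 0 then mid
    else if mid - 1 ≥ start ∧ target = PySem.List.pyGetD arr (mid - 1) 0 then mid - 1
    else if mid + 1 ≤ e ∧ target = PySem.List.pyGetD arr (mid + 1) 0 then mid + 1
    else if target < PySem.List.pyGetD arr (mid - 1) 0 then
      nearlySortedSearchGo arr target start (mid - 2)
    else
      nearlySortedSearchGo arr target (mid + 2) e
  else -1
termination_by (e - start + 1).toNat
decreasing_by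
  · have := PySem.Int.floordiv_two_mid_bounds _h; omega
  · have := PySem.Int.floordiv_two_mid_bounds _h; omega

def nearlySortedSearch (arr : List Int) (target : Int) : Int :=
  nearlySortedSearchGo arr target 0 (arr.length - 1)

-- ===== PORT B =====
-- Source B's rec: base case, then the for-loop over (mid, mid-1, mid+1) as List.find?,
-- then the two recursive calls.
def nearlySortedSearchRec (arr : List Int) (target start e : Int) : Int :=
  if _h : start > e then -1
  else
    let mid := PySem.Int.floordiv (start + e) 2
    match [mid, mid - 1, mid + 1].find?
        (fun j => decide (start ≤ j) && decide (j ≤ e) &&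
                  decide (target = PySem.List.pyGetD arr j 0)) with
    | some j => j
    | none =>
      if target < PySem.List.pyGetD arr (mid - 1) 0 then
        nearlySortedSearchRec arr target start (mid - 2)
      else
        nearlySortedSearchRec arr target (mid + 2) e
termination_by (e - start + 1).toNat
decreasing_by
  · have := PySem.Int.floordiv_two_mid_bounds (show start ≤ e by omega); omega
  · have := PySem.Int.floordiv_two_mid_bounds (show start ≤ e by omega); omega

def nearlySortedSearch_alt (arr : List Int) (target : Int) : Int :=
  nearlySortedSearchRec arr target 0 (arr.length - 1)

-- ===== PRECONDITION & SPEC =====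
def Spec_nearlySortedSearch (arr : List Int) (target : Int) (out : Int) : Prop := out = nearlySortedSearch_alt arr target
instance (arr : List Int) (target : Int) (out : Int) : Decidable (Spec_nearlySortedSearch arr target out) := by unfold Spec_nearlySortedSearch; infer_instance

-- ===== CLAIM (what is proved, stated in full; the proofs are below) =====
def Claim_equal_nearlySortedSearch : Prop := ∀ (arr : List Int) (target : Int), Dom_nearlySortedSearch arr target → Spec_nearlySortedSearch arr target (nearlySortedSearch arr target)

-- ===== LEMMAS AND PROOFS =====

theorem go_eq_rec (arr : List Int) (target : Int) :
    ∀ n : Nat, ∀ start e : Int, (e - start + 1).toNat = n →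
      nearlySortedSearchGo arr target start e = nearlySortedSearchRec arr target start e := by
  intro n
  induction n using Nat.strong_induction_on with
  | _ n ih =>
    intro start e hn
    rw [nearlySortedSearchGo, nearlySortedSearchRec]
    by_cases hse : start ≤ e
    · have hmid := PySem.Int.floordiv_two_mid_bounds hse
      simp only [hse, dif_pos, show ¬ start > e by omega, dite_false]
      set mid := PySem.Int.floordiv (start + e) 2 with hmiddef
      simp only [List.find?]
      by_cases h1 : target = PySem.List.pyGetD arr mid 0
      · simp [h1, hmid.1, hmid.2]
      · simp only [h1, if_false, decide_false, Bool.and_false]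
        by_cases h2 : mid - 1 ≥ start ∧ target = PySem.List.pyGetD arr (mid - 1) 0
        · have : (decide (start ≤ mid - 1) && decide (mid - 1 ≤ e) &&
              decide (target = PySem.List.pyGetD arr (mid - 1) 0)) = true := by
            simp only [Bool.and_eq_true, decide_eq_true_eq]
            exact ⟨⟨h2.1, by omega⟩, h2.2⟩
          simp only [this]
          rw [if_pos h2]
        · have h2' : (decide (start ≤ mid - 1) && decide (mid - 1 ≤ e) &&
              decide (target = PySem.List.pyGetD arr (mid - 1) 0)) = false := by
            simp only [Bool.and_eq_false_iff, decide_eq_false_iff_not]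
            by_cases hb : start ≤ mid - 1
            · right; intro hc; exact h2 ⟨hb, hc⟩
            · left; left; exact hb
          simp only [h2, if_false, h2']
          by_cases h3 : mid + 1 ≤ e ∧ target = PySem.List.pyGetD arr (mid + 1) 0
          · have : (decide (start ≤ mid + 1) && decide (mid + 1 ≤ e) &&
                decide (target = PySem.List.pyGetD arr (mid + 1) 0)) = true := by
              simp only [Bool.and_eq_true, decide_eq_true_eq]
              exact ⟨⟨by omega, h3.1⟩, h3.2⟩
            simp only [this]
            rw [if_pos h3]
          · have h3' : (decide (start ≤ mid + 1) && decide (mid + 1 ≤ e) &&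
                decide (target = PySem.List.pyGetD arr (mid + 1) 0)) = false := by
              simp only [Bool.and_eq_false_iff, decide_eq_false_iff_not]
              by_cases hb : mid + 1 ≤ e
              · right; intro hc; exact h3 ⟨hb, hc⟩
              · left; right; exact hb
            simp only [h3, if_false, h3']
            by_cases h4 : target < PySem.List.pyGetD arr (mid - 1) 0
            · simp only [h4, if_pos]
              exact ih _ (by omega) start (mid - 2) rfl
            · simp only [h4, if_false]
              exact ih _ (by omega) (mid + 2) e rfl
    · simp [hse, show start > e by omega]

-- ===== VERDICT (by name: the statement is the Claim_ definition above) =====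
theorem nearlySortedSearch_spec : Claim_equal_nearlySortedSearch := by
  intro arr target _hdom
  unfold Spec_nearlySortedSearch nearlySortedSearch nearlySortedSearch_alt
  exact go_eq_rec arr target _ 0 (arr.length - 1) rfl
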